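-- pv_equiv track=rewrite | github.com/yukikongju/Miscellaneous-Projects | SaturationCurves/src/plots.py | get_intervals
-- ===== SOURCE A (Python) =====
-- def get_intervals(data, jump: int = 1):
--     """Groups a sorted list of numbers into continuous intervals."""
--     if not data:
--         return []
--
--     # data = sorted(data)
--     intervals = []
--     start = data[0]
--     end = data[0]
--
--     for i in range(1, len(data)):
--         if data[i] == end + jump:
--             end = data[i]
--         else:
--             intervals.append([start, end + jump])
--             start = data[i]
--             end = data[i]
--
--     # Append the last interval
--     intervals.append([start, end + jump])
--     return intervals
-- ===== SOURCE B (Python) =====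
-- def get_intervals(data, jump: int = 1):
--     """Groups a sorted list of numbers into continuous intervals."""
--     if not data:
--         return []
--     brks = [(x, y) for x, y in zip(data, data[1:]) if y != x + jump]
--     starts = [data[0]] + [y for _, y in brks]
--     ends = [x + jump for x, _ in brks] + [data[-1] + jump]
--     return [[s, e] for s, e in zip(starts, ends)]
-- ===== Notes on version B (the rewrite author's own statement) =====
-- stated objective: alternative
-- what changed: Replaces A's single stateful scan carrying (intervals, start, end) with a stateless staged pipeline: zip data with its shifted self to collect the break pairs, build the starts and ends lists from them, and zip those into the result.
import Mathlib
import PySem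

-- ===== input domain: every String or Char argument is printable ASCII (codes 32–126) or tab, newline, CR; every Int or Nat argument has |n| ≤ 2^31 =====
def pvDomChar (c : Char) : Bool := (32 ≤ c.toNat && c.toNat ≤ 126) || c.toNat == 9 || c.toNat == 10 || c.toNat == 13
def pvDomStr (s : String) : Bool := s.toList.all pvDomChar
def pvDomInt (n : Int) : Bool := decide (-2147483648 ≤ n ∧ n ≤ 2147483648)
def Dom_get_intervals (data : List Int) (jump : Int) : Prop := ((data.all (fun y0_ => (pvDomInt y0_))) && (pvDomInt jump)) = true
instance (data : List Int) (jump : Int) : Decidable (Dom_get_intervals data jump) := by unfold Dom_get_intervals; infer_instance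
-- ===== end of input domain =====

-- B replaces A's single stateful scan (intervals, start, end) by a stateless staged pipeline: zip data with its shifted self to collect break pairs, build the starts and ends lists, and zip them into the result.


-- ===== PORT A =====
-- A's for-loop over data[1:], carrying (intervals, start, end), same branches in order.
def pvLoopA (jump : Int) : (List (List Int) × Int × Int) → List Int → (List (List Int) × Int × Int)
  | st, [] => st
  | (ivs, s, e), x :: rest =>
      if x = e + jump then pvLoopA jump (ivs, s, x) rest
      else pvLoopA jump (ivs ++ [[s, e + jump]], x, x) rest

def get_intervals (data : List Int) (jump : Int) : List (List Int) :=
  match data with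
  | [] => []
  | a :: rest =>
      let (ivs, s, e) := pvLoopA jump ([], a, a) rest
      ivs ++ [[s, e + jump]]

-- ===== PORT B =====
-- data[-1] of the nonempty list a :: rest.
def pvLast (a : Int) : List Int → Int
  | [] => a
  | x :: rest => pvLast x rest

def get_intervals_alt (data : List Int) (jump : Int) : List (List Int) :=
  match data with
  | [] => []
  | a :: rest =>
      let brks := (List.zip (a :: rest) rest).filter (fun p => decide (p.2 ≠ p.1 + jump))
      let starts := a :: brks.map (fun p => p.2)
      let ends := brks.map (fun p => p.1 + jump) ++ [pvLast a rest + jump]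
      (List.zip starts ends).map (fun p => [p.1, p.2])

-- ===== PRECONDITION & SPEC =====
def Spec_get_intervals (data : List Int) (jump : Int) (out : List (List Int)) : Prop := out = get_intervals_alt data jump
instance (data : List Int) (jump : Int) (out : List (List Int)) : Decidable (Spec_get_intervals data jump out) := by unfold Spec_get_intervals; infer_instance

-- ===== CLAIM (what is proved, stated in full; the proofs are below) =====
def Claim_equal_get_intervals : Prop := ∀ (data : List Int) (jump : Int), Dom_get_intervals data jump → Spec_get_intervals data jump (get_intervals data jump)

-- ===== LEMMAS AND PROOFS =====
-- B's pipeline starting a segment at s with previous element p and remainder l.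
def pvPipe (jump s p : Int) (l : List Int) : List (List Int) :=
  (List.zip (s :: ((List.zip (p :: l) l).filter (fun q => decide (q.2 ≠ q.1 + jump))).map (fun q => q.2))
            (((List.zip (p :: l) l).filter (fun q => decide (q.2 ≠ q.1 + jump))).map (fun q => q.1 + jump)
              ++ [pvLast p l + jump])).map (fun q => [q.1, q.2])

theorem pvLoopA_key (jump : Int) (l : List Int) :
    ∀ (ivs : List (List Int)) (s p : Int),
      (pvLoopA jump (ivs, s, p) l).1
        ++ [[(pvLoopA jump (ivs, s, p) l).2.1, (pvLoopA jump (ivs, s, p) l).2.2 + jump]]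
      = ivs ++ pvPipe jump s p l := by
  induction l with
  | nil => intro ivs s p; simp [pvLoopA, pvPipe, pvLast]
  | cons x rest ih =>
      intro ivs s p
      simp only [pvLoopA]
      split
      · rename_i hx
        rw [ih ivs s x]
        simp [pvPipe, pvLast, hx]
      · rename_i hx
        rw [ih (ivs ++ [[s, p + jump]]) x x]
        simp [pvPipe, pvLast, hx, List.append_assoc]

-- ===== VERDICT (by name: the statement is the Claim_ definition above) =====
theorem get_intervals_spec : Claim_equal_get_intervals := by
  intro data jump _
  unfold Spec_get_intervals
  cases data with
  | nil => simp [get_intervals, get_intervals_alt]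
  | cons a rest =>
      have h := pvLoopA_key jump rest [] a a
      simp only [List.nil_append] at h
      rw [get_intervals, get_intervals_alt]
      simpa [pvPipe] using h
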